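-- pv_equiv track=rewrite | github.com/VisTrails/VisTrails | vistrails/core/scripting/scripts.py | indentation
-- ===== SOURCE A (Python) =====
-- def indentation(line):
--     """Gets the indentation level of a line of code.
--
--     See Python Language Reference, 2.1.8. Indentation:
--     https://docs.python.org/2/reference/lexical_analysis.html#indentation
--     """
--     indent = 0
--     for c in line:
--         if c == ' ':
--             indent += 1
--         elif c == '\t':
--             indent += 8 - (indent % 8)
--         else:
--             break
--     return indent
-- ===== SOURCE B (Python) =====
-- def indentation(line):
--     stripped = line.lstrip(' \t')
--     prefix = line[:len(line) - len(stripped)]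
--     return len(prefix.expandtabs(8))
-- ===== Notes on version B (the rewrite author's own statement) =====
-- stated objective: idiomatic
-- what changed: B replaces A's character loop with running column arithmetic by isolating the space/tab prefix via lstrip(' \t') and returning len(prefix.expandtabs(8)), delegating tab expansion to the built-in.
import Mathlib
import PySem

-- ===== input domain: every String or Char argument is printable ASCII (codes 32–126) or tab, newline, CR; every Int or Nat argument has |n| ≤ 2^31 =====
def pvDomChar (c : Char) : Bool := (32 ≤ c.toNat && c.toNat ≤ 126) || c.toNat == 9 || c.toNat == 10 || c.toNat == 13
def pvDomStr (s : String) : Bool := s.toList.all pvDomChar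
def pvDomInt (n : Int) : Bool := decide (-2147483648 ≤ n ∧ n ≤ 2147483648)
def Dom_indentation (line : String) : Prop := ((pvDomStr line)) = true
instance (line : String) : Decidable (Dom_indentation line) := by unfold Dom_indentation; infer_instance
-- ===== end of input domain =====

-- B computes the indentation as len(line.lstrip-prefix.expandtabs(8)) instead of A's running-column loop (objective: idiomatic).


-- ===== PORT A =====
def indentationGo : List Char → Int → Int
  | [], ind => ind
  | c :: rest, ind =>
    if c = ' ' then indentationGo rest (ind + 1)
    else if c = '\t' then indentationGo rest (ind + (8 - PySem.Int.mod ind 8))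
    else ind

def indentation (line : String) : Int := indentationGo line.toList 0

-- ===== PORT B =====
def pvIsBlankTab (c : Char) : Bool := c = ' ' || c = '\t'

-- one character of len(·.expandtabs(8)): a tab advances the column to the next multiple of 8,
-- any other character advances it by 1 (exact for strings without '\n'/'\r'; the prefix here has none)
def pvExpandStep (col : Int) (c : Char) : Int :=
  if c = '\t' then col + (8 - PySem.Int.mod col 8) else col + 1

def indentation_alt (line : String) : Int :=
  let cs := line.toList
  let stripped := cs.dropWhile pvIsBlankTab            -- line.lstrip(' \t') (exact: drops leading ' '/'\t')
  let pfx := cs.take (cs.length - stripped.length)     -- line[:len(line) - len(stripped)]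
  pfx.foldl pvExpandStep 0                             -- len(pfx.expandtabs(8))

-- ===== PRECONDITION & SPEC =====
def Spec_indentation (line : String) (out : Int) : Prop := out = indentation_alt line
instance (line : String) (out : Int) : Decidable (Spec_indentation line out) := by unfold Spec_indentation; infer_instance

-- ===== CLAIM (what is proved, stated in full; the proofs are below) =====
def Claim_equal_indentation : Prop := ∀ (line : String), Dom_indentation line → Spec_indentation line (indentation line)

-- ===== LEMMAS AND PROOFS =====
theorem pv_take_eq_takeWhile (cs : List Char) :
    cs.take (cs.length - (cs.dropWhile pvIsBlankTab).length) = cs.takeWhile pvIsBlankTab := by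
  have h := List.takeWhile_append_dropWhile (p := pvIsBlankTab) (l := cs)
  have hlen : cs.length - (cs.dropWhile pvIsBlankTab).length = (cs.takeWhile pvIsBlankTab).length := by
    have h' := congrArg List.length h
    simp only [List.length_append] at h'
    omega
  rw [hlen]
  nth_rewrite 2 [← h]
  exact List.take_left

theorem pv_go_eq_foldl (l : List Char) (ind : Int) :
    indentationGo l ind = (l.takeWhile pvIsBlankTab).foldl pvExpandStep ind := by
  induction l generalizing ind with
  | nil => simp [indentationGo]
  | cons c rest ih =>
    by_cases hs : c = ' '
    · simp [indentationGo, hs, pvIsBlankTab, pvExpandStep, ih]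
    · by_cases ht : c = '\t'
      · simp [indentationGo, ht, pvIsBlankTab, pvExpandStep, ih]
      · simp [indentationGo, hs, ht, pvIsBlankTab]

-- ===== VERDICT (by name: the statement is the Claim_ definition above) =====
theorem indentation_spec : Claim_equal_indentation := by
  intro line _
  unfold Spec_indentation indentation indentation_alt
  simp only [pv_take_eq_takeWhile]
  exact pv_go_eq_foldl _ _
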